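-- pv_equiv track=rewrite | github.com/pypi-data/pypi-mirror-324 | packages/speechmatching/speechmatching-1.0.0.tar.gz/speechmatching-1.0.0/speechmatching/utils.py | process_string_alnum
-- ===== SOURCE A (Python) =====
-- def process_string_alnum(s: str) -> str:
--     """Normalize a string to only alphanumerical characters and no duplicates.
--
--     Examples:
--         >>> process_string_alnum("aaabbc!c???")
--         'abc'
--
--     Args:
--         s: The string to process.
--
--     Returns:
--         The normalized string.
--     """
--     result = ''
--     for c in s:
--         if not c.isalnum():
--             continue
--         if len(result) > 0 and result[-1] == c:
--             continue
--         result += c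
--     return result
-- ===== SOURCE B (Python) =====
-- def process_string_alnum(s: str) -> str:
--     # Stage 1: keep only alphanumeric characters.
--     f = [c for c in s if c.isalnum()]
--     # Stage 2: keep each char that differs from its successor, i.e. the LAST
--     # char of every maximal run of equal chars (a run's chars are all equal,
--     # so the result string is the same as keeping the first of each run).
--     return ''.join(c for c, nxt in zip(f, f[1:] + [None]) if c != nxt)
-- ===== Notes on version B (the rewrite author's own statement) =====
-- stated objective: alternative
-- what changed: Replaces A's stateful accumulator (append unless equal to result[-1], keeping the FIRST char of each duplicate run) with two stateless staged passes: a filter to alphanumerics, then a lookahead zip of the filtered list with its own tail that keeps each char differing from its successor, i.e. the LAST char of each run; the outputs coincide because all chars of a run are equal.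
import Mathlib
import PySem

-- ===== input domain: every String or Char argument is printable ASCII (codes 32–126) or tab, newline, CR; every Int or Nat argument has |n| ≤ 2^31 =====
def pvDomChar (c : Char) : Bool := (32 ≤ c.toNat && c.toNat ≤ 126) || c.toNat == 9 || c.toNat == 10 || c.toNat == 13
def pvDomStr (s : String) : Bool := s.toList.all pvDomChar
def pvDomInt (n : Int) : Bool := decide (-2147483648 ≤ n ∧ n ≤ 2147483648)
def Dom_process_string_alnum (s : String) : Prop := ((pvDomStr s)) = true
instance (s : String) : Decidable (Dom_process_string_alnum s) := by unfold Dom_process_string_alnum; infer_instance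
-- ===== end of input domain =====

-- B replaces A's stateful result[-1] accumulator by two stateless passes: filter to
-- alphanumerics, then a lookahead zip keeping each char that differs from its successor
-- (the last char of each run); same string since a run's chars are all equal.


-- ===== PORT A =====
-- one loop step of A: skip non-alnum, skip if equal to result[-1], else append
def pvAStep (res : List Char) (c : Char) : List Char :=
  if ¬ (PySem.Chars.isalnum c) then res
  else if res.length > 0 ∧ PySem.List.pyGet? res (-1) = some c then res
  else res ++ [c]

def process_string_alnum (s : String) : String :=
  String.mk (s.toList.foldl pvAStep [])

-- ===== PORT B =====
-- B's stage 2: the zip-with-tail comprehension "keep c from zip(f, f[1:]+[None]) if c != nxt",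
-- transcribed as structural recursion on the filtered list: each element is paired with its
-- successor (none at the end) and kept when they differ — the last char of each run.
def pvKeepLast : List Char → List Char
  | [] => []
  | [a] => [a]                                         -- nxt = none ≠ some a: kept
  | a :: b :: t => if a == b then pvKeepLast (b :: t) else a :: pvKeepLast (b :: t)

def process_string_alnum_alt (s : String) : String :=
  String.mk (pvKeepLast (s.toList.filter PySem.Chars.isalnum))

-- ===== PRECONDITION & SPEC =====
def Spec_process_string_alnum (s : String) (out : String) : Prop := out = process_string_alnum_alt s
instance (s : String) (out : String) : Decidable (Spec_process_string_alnum s out) := by unfold Spec_process_string_alnum; infer_instance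

-- ===== CLAIM (what is proved, stated in full; the proofs are below) =====
def Claim_equal_process_string_alnum : Prop := ∀ (s : String), Dom_process_string_alnum s → Spec_process_string_alnum s (process_string_alnum s)

-- ===== LEMMAS AND PROOFS =====

-- collapse relative to the previous character (the state A's loop maintains)
def pvCollapse : Option Char → List Char → List Char
  | _, [] => []
  | last, c :: t => if last = some c then pvCollapse last t else c :: pvCollapse (some c) t

theorem pvAStep_eq (res : List Char) (c : Char) :
    pvAStep res c =
      if ¬ (PySem.Chars.isalnum c) then res
      else if res.getLast? = some c then res else res ++ [c] := by
  unfold pvAStep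
  rcases res.eq_nil_or_concat with h | ⟨ys, y, h⟩ <;> subst h <;>
    simp [PySem.List.pyGet?, PySem.List.pyIdx?]

theorem pvFoldl_filter (l : List Char) (res : List Char) :
    l.foldl pvAStep res = (l.filter PySem.Chars.isalnum).foldl pvAStep res := by
  induction l generalizing res with
  | nil => rfl
  | cons c t ih =>
    by_cases h : PySem.Chars.isalnum c = true
    · simp [h, ih]
    · simp [h, ih, pvAStep_eq]

theorem pvFoldl_collapse (l : List Char) (res : List Char)
    (hl : ∀ c ∈ l, PySem.Chars.isalnum c = true) :
    l.foldl pvAStep res = res ++ pvCollapse res.getLast? l := by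
  induction l generalizing res with
  | nil => simp [pvCollapse]
  | cons c t ih =>
    have hc := hl c (by simp)
    have ht : ∀ x ∈ t, PySem.Chars.isalnum x = true := fun x hx => hl x (by simp [hx])
    simp only [List.foldl_cons, pvAStep_eq, hc]
    by_cases hlast : res.getLast? = some c
    · simp [hlast, pvCollapse, ih _ ht]
    · simp [hlast, pvCollapse, ih _ ht]

-- keeping the LAST char of each run equals keeping the FIRST (pvCollapse): run chars are equal
theorem pvKeepLast_cons (a : Char) (t : List Char) :
    pvKeepLast (a :: t) = a :: pvCollapse (some a) t := by
  induction t generalizing a with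
  | nil => simp [pvKeepLast, pvCollapse]
  | cons b t' ih =>
    by_cases h : a = b
    · subst h; simp [pvKeepLast, pvCollapse, ih]
    · simp [pvKeepLast, pvCollapse, h, ih]

theorem pvKeepLast_eq_collapse (l : List Char) : pvKeepLast l = pvCollapse none l := by
  cases l with
  | nil => rfl
  | cons a t => simp [pvKeepLast_cons, pvCollapse]

-- ===== VERDICT (by name: the statement is the Claim_ definition above) =====
theorem process_string_alnum_spec : Claim_equal_process_string_alnum := by
  intro s _
  unfold Spec_process_string_alnum process_string_alnum process_string_alnum_alt
  rw [pvFoldl_filter, pvFoldl_collapse _ _ (fun c hc => (List.mem_filter.mp hc).2),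
    pvKeepLast_eq_collapse]
  simp
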